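-- pv_equiv track=rewrite | github.com/BP-Consultoria/liquidation-anticipation-bot | src/utils/extrair_extratos.py | buscar_conta_por_cedente
-- ===== SOURCE A (Python) =====
-- CONTAS = {
--     '0003717752': "IG TRANSPORTES LTDA",
--     '0003715768': "TEC TRANSPORTES LTDA",
--     '0003730040': "GAIA EMPREENDIMENTOS CONSTRUCOES E",
-- }
--
-- def buscar_conta_por_cedente(cedente_db: str) -> str | None:
--     """Mapeia nome do cedente do banco → número da conta no Arbi (duas primeiras palavras)."""
--     cedente_upper = cedente_db.upper().strip()
--     for conta, nome_arbi in CONTAS.items():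
--         palavras_arbi = nome_arbi.upper().split()[:2]
--         palavras_db = cedente_upper.split()[:2]
--         if palavras_arbi == palavras_db:
--             return conta
--     return None
-- ===== SOURCE B (Python) =====
-- CONTAS = {
--     '0003717752': "IG TRANSPORTES LTDA",
--     '0003715768': "TEC TRANSPORTES LTDA",
--     '0003730040': "GAIA EMPREENDIMENTOS CONSTRUCOES E",
-- }
--
-- # Inverted index built once: first two words of each Arbi name -> account number.
-- INDEX = {tuple(nome.upper().split()[:2]): conta for conta, nome in CONTAS.items()}
--
-- def buscar_conta_por_cedente(cedente_db: str) -> str | None: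
--     """Mapeia nome do cedente do banco → número da conta no Arbi (duas primeiras palavras)."""
--     return INDEX.get(tuple(cedente_db.upper().strip().split()[:2]))
-- ===== Notes on version B (the rewrite author's own statement) =====
-- stated objective: idiomatic
-- what changed: Replaced the per-call linear scan over CONTAS (recomputing each name's first-two-words key inside the loop) with a module-level inverted index keyed by the first two words, so the function is a single dict lookup.
import Mathlib
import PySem

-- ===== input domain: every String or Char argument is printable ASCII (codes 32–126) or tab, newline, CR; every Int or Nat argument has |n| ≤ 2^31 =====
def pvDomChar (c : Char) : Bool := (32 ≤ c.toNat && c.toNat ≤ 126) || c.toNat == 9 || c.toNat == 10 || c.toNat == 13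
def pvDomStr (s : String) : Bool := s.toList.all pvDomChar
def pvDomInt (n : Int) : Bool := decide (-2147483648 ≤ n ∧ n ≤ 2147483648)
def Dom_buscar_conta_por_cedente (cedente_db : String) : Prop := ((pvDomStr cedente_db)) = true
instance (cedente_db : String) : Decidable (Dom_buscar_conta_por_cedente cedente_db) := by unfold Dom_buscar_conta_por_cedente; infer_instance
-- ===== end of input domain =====

-- B replaces A's per-call scan over CONTAS with a precomputed inverted index (first two words → account) queried once.

-- ===== PORT A =====
def pvCONTAS : List (String × String) :=
  [("0003717752", "IG TRANSPORTES LTDA"),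
   ("0003715768", "TEC TRANSPORTES LTDA"),
   ("0003730040", "GAIA EMPREENDIMENTOS CONSTRUCOES E")]

-- the 'for conta, nome_arbi in CONTAS.items()' loop of A
def pvBuscaLoop (items : List (String × String)) (cedente_upper : String) : Option String :=
  match items with
  | [] => none
  | (conta, nome_arbi) :: rest =>
    let palavras_arbi := PySem.List.slice (PySem.Str.split₀ (PySem.Str.upper nome_arbi)) none (some 2)
    let palavras_db := PySem.List.slice (PySem.Str.split₀ cedente_upper) none (some 2)
    if palavras_arbi == palavras_db then some conta else pvBuscaLoop rest cedente_upper

def buscar_conta_por_cedente (cedente_db : String) : Option String :=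
  pvBuscaLoop pvCONTAS (PySem.Str.strip (PySem.Str.upper cedente_db))

-- ===== PORT B =====
-- module-level INDEX = {tuple(nome.upper().split()[:2]): conta for conta, nome in CONTAS.items()}
def pvINDEX : PySem.Dict (List String) String :=
  PySem.Dict.ofList (pvCONTAS.map (fun p =>
    (PySem.List.slice (PySem.Str.split₀ (PySem.Str.upper p.2)) none (some 2), p.1)))

def buscar_conta_por_cedente_alt (cedente_db : String) : Option String :=
  pvINDEX.get? (PySem.List.slice (PySem.Str.split₀ (PySem.Str.strip (PySem.Str.upper cedente_db))) none (some 2))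

-- ===== PRECONDITION & SPEC =====
def Spec_buscar_conta_por_cedente (cedente_db : String) (out : Option String) : Prop := out = buscar_conta_por_cedente_alt cedente_db
instance (cedente_db : String) (out : Option String) : Decidable (Spec_buscar_conta_por_cedente cedente_db out) := by unfold Spec_buscar_conta_por_cedente; infer_instance

-- ===== CLAIM (what is proved, stated in full; the proofs are below) =====
def Claim_equal_buscar_conta_por_cedente : Prop := ∀ (cedente_db : String), Dom_buscar_conta_por_cedente cedente_db → Spec_buscar_conta_por_cedente cedente_db (buscar_conta_por_cedente cedente_db)

-- ===== LEMMAS AND PROOFS =====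
-- the three literal keys of the index, evaluated once
theorem pvKey1 : PySem.List.slice (PySem.Str.split₀ (PySem.Str.upper "IG TRANSPORTES LTDA")) none (some 2) = ["IG", "TRANSPORTES"] := by decide
theorem pvKey2 : PySem.List.slice (PySem.Str.split₀ (PySem.Str.upper "TEC TRANSPORTES LTDA")) none (some 2) = ["TEC", "TRANSPORTES"] := by decide
theorem pvKey3 : PySem.List.slice (PySem.Str.split₀ (PySem.Str.upper "GAIA EMPREENDIMENTOS CONSTRUCOES E")) none (some 2) = ["GAIA", "EMPREENDIMENTOS"] := by decide

theorem pvINDEX_items : pvINDEX =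
    PySem.Dict.mk [(["IG", "TRANSPORTES"], "0003717752"),
                   (["TEC", "TRANSPORTES"], "0003715768"),
                   (["GAIA", "EMPREENDIMENTOS"], "0003730040")] := by decide

-- ===== VERDICT (by name: the statement is the Claim_ definition above) =====
theorem buscar_conta_por_cedente_spec : Claim_equal_buscar_conta_por_cedente := by
  intro cedente_db _
  show _ = _
  unfold buscar_conta_por_cedente buscar_conta_por_cedente_alt
  rw [pvINDEX_items]
  generalize PySem.Str.strip (PySem.Str.upper cedente_db) = cu
  simp only [pvBuscaLoop, pvCONTAS, pvKey1, pvKey2, pvKey3, PySem.Dict.get?_mk_cons]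
  -- both sides are the same if-chain over the key of cu
  generalize PySem.List.slice (PySem.Str.split₀ cu) none (some 2) = k
  by_cases h1 : ["IG", "TRANSPORTES"] == k <;> by_cases h2 : ["TEC", "TRANSPORTES"] == k <;>
    by_cases h3 : ["GAIA", "EMPREENDIMENTOS"] == k <;> simp [h1, h2, h3, PySem.Dict.get?]
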